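-- pv_equiv track=rewrite | github.com/TaimurKhaliq/workspace-control | workspace_control/propose.py | _cap_reference_paths
-- ===== SOURCE A (Python) =====
-- from collections.abc import Sequence
--
-- FRONTEND_PATH_MARKERS = ("pages", "components", "forms", "services", "api", "public")
--
-- SHARED_SUPPORT_TOKENS = {"contract", "openapi", "schema", "swagger"}
--
-- def _cap_reference_paths(paths: Sequence[str]) -> list[str]:
--     limits = {"frontend": 1, "backend": 3, "shared": 0}
--     counts = {key: 0 for key in limits}
--     kept: list[str] = []
--     for path in paths:
--         group = _inspect_path_group(path)
--         if counts[group] >= limits[group]: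
--             continue
--         counts[group] += 1
--         kept.append(path)
--     return kept
--
-- def _inspect_path_group(path: str) -> str:
--     lowered = path.lower()
--     if lowered.startswith(("client/", "frontend/", "web/", "ui/")) or any(
--         marker in lowered for marker in FRONTEND_PATH_MARKERS
--     ):
--         return "frontend"
--     if any(token in lowered for token in SHARED_SUPPORT_TOKENS):
--         return "shared"
--     return "backend"
-- ===== SOURCE B (Python) =====
-- FRONTEND_PATH_MARKERS = ("pages", "components", "forms", "services", "api", "public")
--
-- SHARED_SUPPORT_TOKENS = {"contract", "openapi", "schema", "swagger"}
--
-- def _inspect_path_group(path: str) -> str: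
--     lowered = path.lower()
--     if lowered.startswith(("client/", "frontend/", "web/", "ui/")) or any(
--         marker in lowered for marker in FRONTEND_PATH_MARKERS
--     ):
--         return "frontend"
--     if any(token in lowered for token in SHARED_SUPPORT_TOKENS):
--         return "shared"
--     return "backend"
--
-- def _cap_reference_paths(paths):
--     limits = {"frontend": 1, "backend": 3, "shared": 0}
--     groups = {"frontend": [], "backend": [], "shared": []}
--     for i, path in enumerate(paths):
--         groups[_inspect_path_group(path)].append(i)
--     selected = sorted(
--         i for group, idxs in groups.items() for i in idxs[: limits[group]]
--     )
--     return [paths[i] for i in selected]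
-- ===== Notes on version B (the rewrite author's own statement) =====
-- stated objective: alternative
-- what changed: B replaces A's single stateful pass (per-group counters with early continue) by a grouped index table: it first buckets each path's original index by group, then slices each bucket to its limit, sorts the selected indices and emits paths in original order.
import Mathlib
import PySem

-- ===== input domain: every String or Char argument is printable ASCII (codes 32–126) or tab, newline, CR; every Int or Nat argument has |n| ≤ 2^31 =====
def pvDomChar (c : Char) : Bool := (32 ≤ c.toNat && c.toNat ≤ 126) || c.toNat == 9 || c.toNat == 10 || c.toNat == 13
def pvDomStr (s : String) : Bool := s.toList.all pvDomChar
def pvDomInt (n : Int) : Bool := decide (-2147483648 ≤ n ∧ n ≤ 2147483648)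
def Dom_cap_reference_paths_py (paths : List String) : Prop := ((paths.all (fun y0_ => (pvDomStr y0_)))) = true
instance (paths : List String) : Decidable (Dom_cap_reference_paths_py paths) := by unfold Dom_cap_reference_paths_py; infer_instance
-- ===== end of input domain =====

-- B replaces A's single stateful greedy pass by a grouped index table (per-group original
-- indices, sliced to each group's limit, re-sorted into original order) — objective: alternative decomposition.

-- ===== PORT A =====
-- module constants shared by both Pythons
def pvFrontendMarkers : List String := ["pages", "components", "forms", "services", "api", "public"]
-- Python set literal; `any` over it is order-independent, ported as the distinct-element list
def pvSharedTokens : List String := ["contract", "openapi", "schema", "swagger"]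

def pvInspectPathGroup (path : String) : String :=
  let lowered := PySem.Str.lower path
  if (["client/", "frontend/", "web/", "ui/"].any (fun p => PySem.Str.startswith lowered p))
      || pvFrontendMarkers.any (fun m => PySem.Str.isIn m lowered) then "frontend"
  else if pvSharedTokens.any (fun t => PySem.Str.isIn t lowered) then "shared"
  else "backend"

def pvLimits : PySem.Dict String Int :=
  PySem.Dict.ofList [("frontend", 1), ("backend", 3), ("shared", 0)]

-- the loop body of A (counts[group] / limits[group]: group is always a key of both dicts, so getD is exact)
def pvStepA (st : PySem.Dict String Int × List String) (path : String) :
    PySem.Dict String Int × List String :=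
  let group := pvInspectPathGroup path
  if st.1.getD group 0 ≥ pvLimits.getD group 0 then st
  else (st.1.insert group (st.1.getD group 0 + 1), st.2 ++ [path])

def cap_reference_paths_py (paths : List String) : List String :=
  let counts : PySem.Dict String Int :=
    PySem.Dict.ofList (pvLimits.keys.map (fun key => (key, (0 : Int))))
  (paths.foldl pvStepA (counts, [])).2

-- ===== PORT B =====
-- the loop body of B (groups[...]: the three keys are preinserted, so modify with dflt is exact)
def pvStepB (g : PySem.Dict String (List Int)) (p : Int × String) :
    PySem.Dict String (List Int) :=
  g.modify (pvInspectPathGroup p.2) [] (fun l => l ++ [p.1])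

def cap_reference_paths_py_alt (paths : List String) : List String :=
  let groups0 : PySem.Dict String (List Int) :=
    PySem.Dict.ofList [("frontend", []), ("backend", []), ("shared", [])]
  let groups := (PySem.List.enumerate paths 0).foldl pvStepB groups0
  let selected := PySem.List.sorted
    (groups.items.flatMap (fun gi => PySem.List.slice gi.2 none (some (pvLimits.getD gi.1 0))))
    (fun i => i)
  -- paths[i]: every selected i is an enumerate index, hence in range, so getD "" is exact
  selected.map (fun i => (PySem.List.pyGet? paths i).getD "")

-- ===== PRECONDITION & SPEC =====
def Spec_cap_reference_paths_py (paths : List String) (out : List String) : Prop := out = cap_reference_paths_py_alt paths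
instance (paths : List String) (out : List String) : Decidable (Spec_cap_reference_paths_py paths out) := by unfold Spec_cap_reference_paths_py; infer_instance

-- ===== CLAIM (what is proved, stated in full; the proofs are below) =====
def Claim_equal_cap_reference_paths_py : Prop := ∀ (paths : List String), Dom_cap_reference_paths_py paths → Spec_cap_reference_paths_py paths (cap_reference_paths_py paths)

-- ===== LEMMAS AND PROOFS =====

-- the common reference: greedy keep with remaining budgets ra (frontend) and rb (backend); shared is never kept
def pvRef (ra rb : Nat) : List String → List String
  | [] => []
  | p :: rest =>
    if pvInspectPathGroup p = "frontend" then
      if ra = 0 then pvRef 0 rb rest else p :: pvRef (ra - 1) rb rest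
    else if pvInspectPathGroup p = "shared" then pvRef ra rb rest
    else if rb = 0 then pvRef ra 0 rest else p :: pvRef ra (rb - 1) rest

-- the same greedy selection on enumerated pairs
def pvSel (ra rb : Nat) : List (Int × String) → List (Int × String)
  | [] => []
  | q :: rest =>
    if pvInspectPathGroup q.2 = "frontend" then
      if ra = 0 then pvSel 0 rb rest else q :: pvSel (ra - 1) rb rest
    else if pvInspectPathGroup q.2 = "shared" then pvSel ra rb rest
    else if rb = 0 then pvSel ra 0 rest else q :: pvSel ra (rb - 1) rest

theorem pvGroup_cases (p : String) :
    pvInspectPathGroup p = "frontend" ∨ pvInspectPathGroup p = "shared" ∨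
      pvInspectPathGroup p = "backend" := by
  simp only [pvInspectPathGroup]
  split
  · exact Or.inl rfl
  · split
    · exact Or.inr (Or.inl rfl)
    · exact Or.inr (Or.inr rfl)

theorem pvLimF : pvLimits.getD "frontend" 0 = 1 := rfl
theorem pvLimB : pvLimits.getD "backend" 0 = 3 := rfl
theorem pvLimS : pvLimits.getD "shared" 0 = 0 := rfl
theorem pvGetF (a b c : Int) :
    (PySem.Dict.mk [("frontend", a), ("backend", b), ("shared", c)]).getD "frontend" 0 = a := rfl
theorem pvGetB (a b c : Int) :
    (PySem.Dict.mk [("frontend", a), ("backend", b), ("shared", c)]).getD "backend" 0 = b := rfl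
theorem pvGetS (a b c : Int) :
    (PySem.Dict.mk [("frontend", a), ("backend", b), ("shared", c)]).getD "shared" 0 = c := rfl
theorem pvInsF (a b c v : Int) :
    (PySem.Dict.mk [("frontend", a), ("backend", b), ("shared", c)]).insert "frontend" v =
      PySem.Dict.mk [("frontend", v), ("backend", b), ("shared", c)] := rfl
theorem pvInsB (a b c v : Int) :
    (PySem.Dict.mk [("frontend", a), ("backend", b), ("shared", c)]).insert "backend" v =
      PySem.Dict.mk [("frontend", a), ("backend", v), ("shared", c)] := rfl

theorem pvLemA (paths : List String) : ∀ (ra rb : Nat) (cs : Int) (acc : List String),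
    ra ≤ 1 → rb ≤ 3 → 0 ≤ cs →
    (paths.foldl pvStepA
      (PySem.Dict.mk [("frontend", (1 : Int) - ra), ("backend", (3 : Int) - rb), ("shared", cs)],
        acc)).2 = acc ++ pvRef ra rb paths := by
  induction paths with
  | nil => intro ra rb cs acc _ _ _; simp [pvRef]
  | cons p rest ih =>
    intro ra rb cs acc hra hrb hcs
    rw [List.foldl_cons]
    rcases pvGroup_cases p with h | h | h
    · -- frontend
      by_cases h0 : ra = 0
      · subst h0
        simp only [pvStepA, h]
        rw [if_pos (by simp only [pvLimF, pvGetF]; norm_num)]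
        rw [ih 0 rb cs acc (by omega) hrb hcs]
        simp [pvRef, h]
      · have hra1 : ra = 1 := by omega
        subst hra1
        simp only [pvStepA, h]
        rw [if_neg (by simp only [pvLimF, pvGetF]; norm_num)]
        rw [pvGetF, pvInsF,
          show (1 : Int) - ((1 : Nat) : Int) + 1 = 1 - ((0 : Nat) : Int) by norm_num,
          ih 0 rb cs (acc ++ [p]) (by omega) hrb hcs]
        simp [pvRef, h]
    · -- shared
      simp only [pvStepA, h]
      rw [if_pos (by simp only [pvLimS, pvGetS]; omega)]
      rw [ih ra rb cs acc hra hrb hcs]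
      have hns : pvInspectPathGroup p ≠ "frontend" := by simp [h]
      simp [pvRef, h]
    · -- backend
      have hnf : pvInspectPathGroup p ≠ "frontend" := by simp [h]
      have hnss : pvInspectPathGroup p ≠ "shared" := by simp [h]
      by_cases h0 : rb = 0
      · subst h0
        simp only [pvStepA, h]
        rw [if_pos (by simp only [pvLimB, pvGetB]; norm_num)]
        rw [ih ra 0 cs acc hra (by omega) hcs]
        simp [pvRef, hnf, hnss]
      · simp only [pvStepA, h]
        rw [if_neg (by simp only [pvLimB, pvGetB]; omega)]
        rw [pvGetB, pvInsB,
          show (3 : Int) - (rb : Int) + 1 = 3 - ((rb - 1 : Nat) : Int) by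
            have h1 : 1 ≤ rb := by omega
            push_cast [h1]; ring,
          ih ra (rb - 1) cs (acc ++ [p]) hra (by omega) hcs]
        simp [pvRef, hnf, hnss, h0]

def pvIdx (g : String) (e : List (Int × String)) : List Int :=
  (e.filter (fun q => pvInspectPathGroup q.2 == g)).map (·.1)

theorem pvModF (la lb ls : List Int) (i : Int) :
    (PySem.Dict.mk [("frontend", la), ("backend", lb), ("shared", ls)]).modify "frontend" []
      (fun l => l ++ [i]) =
    PySem.Dict.mk [("frontend", la ++ [i]), ("backend", lb), ("shared", ls)] := rfl
theorem pvModB (la lb ls : List Int) (i : Int) :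
    (PySem.Dict.mk [("frontend", la), ("backend", lb), ("shared", ls)]).modify "backend" []
      (fun l => l ++ [i]) =
    PySem.Dict.mk [("frontend", la), ("backend", lb ++ [i]), ("shared", ls)] := rfl
theorem pvModS (la lb ls : List Int) (i : Int) :
    (PySem.Dict.mk [("frontend", la), ("backend", lb), ("shared", ls)]).modify "shared" []
      (fun l => l ++ [i]) =
    PySem.Dict.mk [("frontend", la), ("backend", lb), ("shared", ls ++ [i])] := rfl

theorem pvIdx_cons (g : String) (q : Int × String) (e : List (Int × String)) :
    pvIdx g (q :: e) =
      (if pvInspectPathGroup q.2 == g then [q.1] else []) ++ pvIdx g e := by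
  by_cases h : pvInspectPathGroup q.2 == g <;> simp [pvIdx, h]

theorem pvLemB1 (e : List (Int × String)) : ∀ (la lb ls : List Int),
    e.foldl pvStepB (PySem.Dict.mk [("frontend", la), ("backend", lb), ("shared", ls)]) =
      PySem.Dict.mk [("frontend", la ++ pvIdx "frontend" e),
        ("backend", lb ++ pvIdx "backend" e), ("shared", ls ++ pvIdx "shared" e)] := by
  induction e with
  | nil => intro la lb ls; simp [pvIdx]
  | cons q rest ih =>
    intro la lb ls
    rw [List.foldl_cons]
    rcases pvGroup_cases q.2 with h | h | h
    · simp only [pvStepB, h, pvModF]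
      rw [ih]
      simp [pvIdx_cons, h, List.append_assoc]
    · simp only [pvStepB, h, pvModS]
      rw [ih]
      simp [pvIdx_cons, h, List.append_assoc]
    · simp only [pvStepB, h, pvModB]
      rw [ih]
      simp [pvIdx_cons, h, List.append_assoc]

theorem pvSel_sublist (ra rb : Nat) (e : List (Int × String)) :
    (pvSel ra rb e).Sublist e := by
  induction e generalizing ra rb with
  | nil => simp [pvSel]
  | cons q rest ih =>
    simp only [pvSel]
    split_ifs <;> first
      | exact List.Sublist.cons₂ q (ih _ _)
      | exact List.Sublist.cons q (ih _ _)

theorem pvSel_perm (e : List (Int × String)) : ∀ (ra rb : Nat),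
    ((pvSel ra rb e).map (·.1)).Perm
      ((pvIdx "frontend" e).take ra ++ (pvIdx "backend" e).take rb) := by
  induction e with
  | nil => intro ra rb; simp [pvSel, pvIdx]
  | cons q rest ih =>
    intro ra rb
    rcases pvGroup_cases q.2 with h | h | h
    · have hf : pvIdx "frontend" (q :: rest) = q.1 :: pvIdx "frontend" rest := by
        simp [pvIdx_cons, h]
      have hb : pvIdx "backend" (q :: rest) = pvIdx "backend" rest := by
        simp [pvIdx_cons, h]
      rw [hf, hb]
      by_cases h0 : ra = 0
      · subst h0; simp only [pvSel, h]
        simpa using ih 0 rb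
      · simp only [pvSel, h, if_neg h0]
        rcases Nat.exists_eq_succ_of_ne_zero h0 with ⟨n, rfl⟩
        simp only [List.take_succ_cons, Nat.succ_sub_one]
        exact (ih n rb).cons q.1
    · have hf : pvIdx "frontend" (q :: rest) = pvIdx "frontend" rest := by
        simp [pvIdx_cons, h]
      have hb : pvIdx "backend" (q :: rest) = pvIdx "backend" rest := by
        simp [pvIdx_cons, h]
      have hns : pvInspectPathGroup q.2 ≠ "frontend" := by simp [h]
      rw [hf, hb]
      simp only [pvSel, h]
      exact ih ra rb
    · have hnf : pvInspectPathGroup q.2 ≠ "frontend" := by simp [h]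
      have hns : pvInspectPathGroup q.2 ≠ "shared" := by simp [h]
      have hf : pvIdx "frontend" (q :: rest) = pvIdx "frontend" rest := by
        simp [pvIdx_cons, h]
      have hb : pvIdx "backend" (q :: rest) = q.1 :: pvIdx "backend" rest := by
        simp [pvIdx_cons, h]
      rw [hf, hb]
      by_cases h0 : rb = 0
      · subst h0; simp only [pvSel, h]
        simpa using ih ra 0
      · simp only [pvSel, h, if_neg h0]
        rcases Nat.exists_eq_succ_of_ne_zero h0 with ⟨n, rfl⟩
        simp only [List.take_succ_cons, Nat.succ_sub_one]
        exact ((ih ra n).cons q.1).trans (List.perm_middle).symm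

theorem pvLemB (paths : List String) :
    cap_reference_paths_py_alt paths = (pvSel 1 3 (PySem.List.enumerate paths 0)).map (·.2) := by
  show (PySem.List.sorted
      ((((PySem.List.enumerate paths 0).foldl pvStepB
          (PySem.Dict.mk [("frontend", []), ("backend", []), ("shared", [])])).items).flatMap
        (fun gi => PySem.List.slice gi.2 none (some (pvLimits.getD gi.1 0))))
      (fun i => i)).map (fun i => (PySem.List.pyGet? paths i).getD "") = _
  rw [pvLemB1]
  set e := PySem.List.enumerate paths 0 with he
  have hitems : (PySem.Dict.mk [("frontend", [] ++ pvIdx "frontend" e),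
      ("backend", [] ++ pvIdx "backend" e), ("shared", [] ++ pvIdx "shared" e)]).items =
      [("frontend", pvIdx "frontend" e), ("backend", pvIdx "backend" e),
       ("shared", pvIdx "shared" e)] := rfl
  rw [hitems]
  have hflat : ([("frontend", pvIdx "frontend" e), ("backend", pvIdx "backend" e),
      ("shared", pvIdx "shared" e)].flatMap
        (fun gi => PySem.List.slice gi.2 none (some (pvLimits.getD gi.1 0)))) =
      (pvIdx "frontend" e).take 1 ++ (pvIdx "backend" e).take 3 := by
    simp only [List.flatMap_cons, List.flatMap_nil, pvLimF, pvLimB, pvLimS]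
    rw [PySem.List.slice_to _ (by norm_num), PySem.List.slice_to _ (by norm_num),
      PySem.List.slice_to _ (by norm_num)]
    simp
  rw [hflat]
  have hsorted : PySem.List.sorted ((pvIdx "frontend" e).take 1 ++ (pvIdx "backend" e).take 3)
      (fun i => i) = (pvSel 1 3 e).map (·.1) := by
    apply PySem.List.sorted_eq_of_perm_of_pairwise_lt
    · exact pvSel_perm e 1 3
    · exact List.Pairwise.sublist ((pvSel_sublist 1 3 e).map (·.1))
        (by simpa [List.pairwise_map] using PySem.List.pairwise_lt_enumerate paths 0)
  rw [hsorted, List.map_map]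
  apply List.map_congr_left
  intro q hq
  have hqe : q ∈ e := (pvSel_sublist 1 3 e).mem hq
  rw [he, PySem.List.mem_enumerate_iff] at hqe
  rcases hqe with ⟨k, hk, rfl⟩
  simp [PySem.List.pyGet?_natCast, List.getElem?_eq_getElem hk]

theorem pvSelRef (paths : List String) : ∀ (s : Int) (ra rb : Nat),
    (pvSel ra rb (PySem.List.enumerate paths s)).map (·.2) = pvRef ra rb paths := by
  induction paths with
  | nil => intro s ra rb; simp [PySem.List.enumerate_nil, pvSel, pvRef]
  | cons p rest ih =>
    intro s ra rb
    rw [PySem.List.enumerate_cons]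
    rcases pvGroup_cases p with h | h | h <;>
      simp only [pvSel, pvRef, h] <;> split_ifs <;>
      simp_all [List.map_cons, ih (s+1)]

-- ===== VERDICT (by name: the statement is the Claim_ definition above) =====
theorem cap_reference_paths_py_spec : Claim_equal_cap_reference_paths_py := by
  intro paths _
  unfold Spec_cap_reference_paths_py
  have hA : cap_reference_paths_py paths = pvRef 1 3 paths := by
    have := pvLemA paths 1 3 0 [] (by norm_num) (by norm_num) (by norm_num)
    simpa [cap_reference_paths_py] using this
  rw [hA, pvLemB paths, pvSelRef paths 0 1 3]
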